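-- pv_equiv track=rewrite | github.com/CyKlop3345/ImageCropper_Script | src/cropper.py | iterator_2d
-- ===== SOURCE A (Python) =====
-- def iterator_2d(side: int, size: tuple[int, int]):
-- 	# side:
-- 	# 0 - left, 1 - up, 2 - right, 3 - down
-- 	if side == 0:
-- 		for x in range(size[0]-1):
-- 			for y in range(size[1]-1):
-- 				yield (x, y)
--
-- 	elif side == 1:
-- 		for y in range(size[1]-1):
-- 			for x in range(size[0]-1):
-- 				yield (x, y)
--
-- 	elif side == 2:
-- 		for x in range(size[0]-1, 0, -1):
-- 			for y in range(size[1]-1):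
-- 				yield (x, y)
--
-- 	elif side == 3:
-- 		for y in range(size[1]-1, 0, -1):
-- 			for x in range(size[0]-1):
-- 				yield (x, y)
-- ===== SOURCE B (Python) =====
-- def iterator_2d(side: int, size: tuple[int, int]):
--     # Flat enumeration: one loop over k in range(outer*inner); the pair is
--     # recovered from k by divmod, and mapped to coordinates per side.
--     if side not in (0, 1, 2, 3):
--         return
--     nx = max(size[0] - 1, 0)
--     ny = max(size[1] - 1, 0)
--     outer_n, inner_n = (nx, ny) if side in (0, 2) else (ny, nx)
--     for k in range(outer_n * inner_n):
--         o, i = divmod(k, inner_n)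
--         if side == 0:
--             yield (o, i)
--         elif side == 1:
--             yield (i, o)
--         elif side == 2:
--             yield (nx - o, i)
--         else:
--             yield (i, ny - o)
-- ===== Notes on version B (the rewrite author's own statement) =====
-- stated objective: alternative
-- what changed: Replaces A's four hand-written nested loops by a single flat loop over k in range(outer*inner) that reconstructs each coordinate pair from k by divmod and index arithmetic (countdown sides become a subtraction from the top index).
import Mathlib
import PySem

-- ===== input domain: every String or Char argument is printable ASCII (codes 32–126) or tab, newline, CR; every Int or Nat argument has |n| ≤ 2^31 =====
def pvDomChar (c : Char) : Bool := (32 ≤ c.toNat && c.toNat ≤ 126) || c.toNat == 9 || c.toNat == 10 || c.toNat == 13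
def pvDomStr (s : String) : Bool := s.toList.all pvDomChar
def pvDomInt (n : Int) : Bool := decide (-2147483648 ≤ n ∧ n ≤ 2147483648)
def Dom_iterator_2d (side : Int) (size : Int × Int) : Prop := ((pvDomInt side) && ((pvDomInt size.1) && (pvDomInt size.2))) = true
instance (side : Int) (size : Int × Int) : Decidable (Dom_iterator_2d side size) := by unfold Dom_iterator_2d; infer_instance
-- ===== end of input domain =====

-- B replaces A's four nested loops by one flat loop over k in range(outer*inner), reconstructing each pair from k by divmod (alternative algorithm, same cost).


-- ===== PORT A =====
def iterator_2d (side : Int) (size : Int × Int) : List (Int × Int) :=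
  if side == 0 then
    (PySem.List.pyRange 0 (size.1 - 1) 1).flatMap (fun x =>
      (PySem.List.pyRange 0 (size.2 - 1) 1).map (fun y => (x, y)))
  else if side == 1 then
    (PySem.List.pyRange 0 (size.2 - 1) 1).flatMap (fun y =>
      (PySem.List.pyRange 0 (size.1 - 1) 1).map (fun x => (x, y)))
  else if side == 2 then
    (PySem.List.pyRange (size.1 - 1) 0 (-1)).flatMap (fun x =>
      (PySem.List.pyRange 0 (size.2 - 1) 1).map (fun y => (x, y)))
  else if side == 3 then
    (PySem.List.pyRange (size.2 - 1) 0 (-1)).flatMap (fun y =>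
      (PySem.List.pyRange 0 (size.1 - 1) 1).map (fun x => (x, y)))
  else []

-- ===== PORT B =====
def iterator_2d_alt (side : Int) (size : Int × Int) : List (Int × Int) :=
  if side ≠ 0 ∧ side ≠ 1 ∧ side ≠ 2 ∧ side ≠ 3 then []
  else
    let nx := max (size.1 - 1) 0
    let ny := max (size.2 - 1) 0
    let oi := if side == 0 || side == 2 then (nx, ny) else (ny, nx)
    (PySem.List.pyRange 0 (oi.1 * oi.2) 1).map (fun k =>
      let o := PySem.Int.floordiv k oi.2
      let i := PySem.Int.mod k oi.2
      if side == 0 then (o, i)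
      else if side == 1 then (i, o)
      else if side == 2 then (nx - o, i)
      else (i, ny - o))

-- ===== PRECONDITION & SPEC =====
def Spec_iterator_2d (side : Int) (size : Int × Int) (out : List (Int × Int)) : Prop := out = iterator_2d_alt side size
instance (side : Int) (size : Int × Int) (out : List (Int × Int)) : Decidable (Spec_iterator_2d side size out) := by unfold Spec_iterator_2d; infer_instance

-- ===== CLAIM =====
def Claim_equal_iterator_2d : Prop := ∀ (side : Int) (size : Int × Int), Dom_iterator_2d side size → Spec_iterator_2d side size (iterator_2d side size)

-- ===== LEMMAS AND PROOFS =====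

-- Row-major flattening: a nested loop over Nat ranges equals one flat loop with div/mod.
theorem pv_flatMap_range_eq {α : Type} (m n : Nat) (f : Nat → Nat → α) :
    (List.range m).flatMap (fun o => (List.range n).map (f o)) =
    (List.range (m * n)).map (fun k => f (k / n) (k % n)) := by
  induction m with
  | zero => simp
  | succ m ih =>
    rcases Nat.eq_zero_or_pos n with hn | hn
    · subst hn; simp
    · rw [List.range_succ, List.flatMap_append, ih]
      have h : (m + 1) * n = m * n + n := by ring
      rw [h, List.range_add, List.map_append, List.map_map]
      congr 1
      · simp only [List.flatMap_cons, List.flatMap_nil, List.append_nil]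
        apply List.map_congr_left
        intro j hj
        simp only [List.mem_range] at hj
        have h1 : (m * n + j) / n = m := by
          rw [Nat.mul_comm m n, Nat.mul_add_div hn, Nat.div_eq_of_lt hj, Nat.add_zero]
        have h2 : (m * n + j) % n = j := by
          rw [Nat.mul_comm m n, Nat.mul_add_mod, Nat.mod_eq_of_lt hj]
        simp [Function.comp, h1, h2]

-- The same, with the flat index decomposed by Python floordiv/mod on Int casts.
theorem pv_side_eq (a b : Nat) (g : Int → Int → Int × Int) :
    (List.range a).flatMap (fun (o : Nat) => (List.range b).map (fun (i : Nat) => g (o : Int) (i : Int))) =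
    (List.range (a * b)).map (fun (k : Nat) => g (PySem.Int.floordiv (k : Int) (b : Int)) (PySem.Int.mod (k : Int) (b : Int))) := by
  rw [pv_flatMap_range_eq a b (fun o i => g ↑o ↑i)]
  apply List.map_congr_left
  intro k hk
  simp [PySem.Int.floordiv_natCast, PySem.Int.mod_natCast]

-- ===== VERDICT =====
theorem iterator_2d_spec : Claim_equal_iterator_2d := by
  intro side size _
  obtain ⟨w, h⟩ := size
  unfold Spec_iterator_2d iterator_2d iterator_2d_alt
  simp only []
  by_cases h0 : side = 0
  · subst h0
    simp only [beq_self_eq_true, Bool.true_or, if_true, ne_eq, not_true_eq_false,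
      false_and, if_false]
    have hx : (max (w - 1) 0) = (((w - 1).toNat : Int)) := by omega
    have hy : (max (h - 1) 0) = (((h - 1).toNat : Int)) := by omega
    have hm : (((w - 1).toNat : Int) * ((h - 1).toNat : Int)) = (((w - 1).toNat * (h - 1).toNat : Nat) : Int) := by
      push_cast; ring
    rw [hx, hy, hm, PySem.List.pyRange_one 0 (w - 1), PySem.List.pyRange_one 0 (h - 1),
      PySem.List.pyRange_one 0 _]
    simpa [List.flatMap_map, List.map_map, Function.comp_def, Int.toNat_natCast] using
      pv_side_eq (w - 1).toNat (h - 1).toNat (fun o i => (o, i))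
  by_cases h1 : side = 1
  · subst h1
    norm_num
    have hx : (max (w - 1) 0) = (((w - 1).toNat : Int)) := by omega
    have hy : (max (h - 1) 0) = (((h - 1).toNat : Int)) := by omega
    have hm : (((h - 1).toNat : Int) * ((w - 1).toNat : Int)) = (((h - 1).toNat * (w - 1).toNat : Nat) : Int) := by
      push_cast; ring
    rw [hx, hy, hm, PySem.List.pyRange_one 0 (w - 1), PySem.List.pyRange_one 0 (h - 1),
      PySem.List.pyRange_one 0 _]
    simpa [List.flatMap_map, List.map_map, Function.comp_def, Int.toNat_natCast] using
      pv_side_eq (h - 1).toNat (w - 1).toNat (fun o i => (i, o))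
  by_cases h2 : side = 2
  · subst h2
    norm_num
    rcases (show w ≤ 1 ∨ 1 < w by omega) with hw0 | hw0
    · have he : PySem.List.pyRange (w - 1) 0 (-1) = [] :=
        PySem.List.pyRange_neg_one_eq_nil (by omega)
      have hz : (max (w - 1) 0) = 0 := by omega
      simp [he, hz, PySem.List.pyRange_one_eq_nil]
    · have hx : (max (w - 1) 0) = (((w - 1).toNat : Int)) := by omega
      have hy : (max (h - 1) 0) = (((h - 1).toNat : Int)) := by omega
      have hm : (((w - 1).toNat : Int) * ((h - 1).toNat : Int)) = (((w - 1).toNat * (h - 1).toNat : Nat) : Int) := by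
        push_cast; ring
      have hw : (w - 1) = (((w - 1).toNat : Int)) := by omega
      rw [hx, hy, hm, PySem.List.pyRange_neg_one (w - 1) 0, PySem.List.pyRange_one 0 (h - 1),
        PySem.List.pyRange_one 0 _, hw]
      simpa [List.flatMap_map, List.map_map, Function.comp_def, Int.toNat_natCast] using
        pv_side_eq (w - 1).toNat (h - 1).toNat (fun o i => (((w - 1).toNat : Int) - o, i))
  by_cases h3 : side = 3
  · subst h3
    norm_num
    rcases (show h ≤ 1 ∨ 1 < h by omega) with hh0 | hh0
    · have he : PySem.List.pyRange (h - 1) 0 (-1) = [] :=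
        PySem.List.pyRange_neg_one_eq_nil (by omega)
      have hz : (max (h - 1) 0) = 0 := by omega
      simp [he, hz, PySem.List.pyRange_one_eq_nil]
    · have hx : (max (w - 1) 0) = (((w - 1).toNat : Int)) := by omega
      have hy : (max (h - 1) 0) = (((h - 1).toNat : Int)) := by omega
      have hm : (((h - 1).toNat : Int) * ((w - 1).toNat : Int)) = (((h - 1).toNat * (w - 1).toNat : Nat) : Int) := by
        push_cast; ring
      have hh : (h - 1) = (((h - 1).toNat : Int)) := by omega
      rw [hx, hy, hm, PySem.List.pyRange_neg_one (h - 1) 0, PySem.List.pyRange_one 0 (w - 1),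
        PySem.List.pyRange_one 0 _, hh]
      simpa [List.flatMap_map, List.map_map, Function.comp_def, Int.toNat_natCast] using
        pv_side_eq (h - 1).toNat (w - 1).toNat (fun o i => (i, ((h - 1).toNat : Int) - o))
  · simp [h0, h1, h2, h3]
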